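-- pv_equiv track=rewrite | github.com/Grusinator/MetaDataApi | metadata/services/all_services/base_functions.py | dict_contains_only_attr
-- ===== SOURCE A (Python) =====
-- def dict_contains_only_attr(data):
--     # if its not a dict, then its not an
--     # attribute
--     if not isinstance(data, dict):
--         return False
--
--     data = data.copy()
--     if len(data) == 0:
--         return False
--     attr_names = ["value", "unit"]
--     attrs = [data.pop(name, None) for name in attr_names]
--
--     return len(data) == 0
-- ===== SOURCE B (Python) =====
-- def dict_contains_only_attr(data):
--     # single pass over the keys with early exit: any key other than
--     # "value"/"unit" fails immediately; the flag records non-emptiness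
--     if not isinstance(data, dict):
--         return False
--     found = False
--     for key in data:
--         if key != "value" and key != "unit":
--             return False
--         found = True
--     return found
-- ===== Notes on version B (the rewrite author's own statement) =====
-- stated objective: alternative
-- what changed: B replaces A's copy-then-pop-of-the-two-named-keys-and-check-empty scheme by a single early-exit scan of the dict's own keys with a non-emptiness flag; no copy, no mutation, stops at the first foreign key.
import Mathlib
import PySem

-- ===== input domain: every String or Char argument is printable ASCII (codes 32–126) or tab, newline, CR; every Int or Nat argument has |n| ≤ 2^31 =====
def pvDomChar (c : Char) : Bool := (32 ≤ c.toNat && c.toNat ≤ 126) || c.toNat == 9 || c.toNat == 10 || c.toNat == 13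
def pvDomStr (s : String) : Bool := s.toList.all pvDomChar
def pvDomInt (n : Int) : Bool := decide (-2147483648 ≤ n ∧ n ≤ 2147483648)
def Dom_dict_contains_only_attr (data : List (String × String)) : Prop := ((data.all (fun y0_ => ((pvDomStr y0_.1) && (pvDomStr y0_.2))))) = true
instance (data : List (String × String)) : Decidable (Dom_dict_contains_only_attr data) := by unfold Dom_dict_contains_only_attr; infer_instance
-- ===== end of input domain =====

-- B replaces A's copy-and-pop-named-keys-then-check-empty with a single early-exit
-- scan of the dict's keys carrying a non-emptiness flag; same cost, no copy/mutation.

-- ===== PORT A =====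
def dict_contains_only_attr (data : List (String × String)) : Bool :=
  -- data is a dict; isinstance(data, dict) is always true under the type convention
  let d := PySem.Dict.ofList data
  -- data = data.copy(); if len(data) == 0: return False
  if d.size == 0 then false
  else
    -- attrs = [data.pop(name, None) for name in attr_names]: pops the named keys; the
    -- collected values are discarded, so each pop's dict effect is PySem.Dict.erase
    let d := ["value", "unit"].foldl (fun d name => d.erase name) d
    d.size == 0

-- ===== PORT B =====
-- the for-loop over the keys with early return, as structural recursion with the flag
def altScan : List String → Bool → Bool
  | [], found => found
  | k :: ks, found =>
    if k ≠ "value" ∧ k ≠ "unit" then false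
    else altScan ks true

def dict_contains_only_attr_alt (data : List (String × String)) : Bool :=
  altScan (PySem.Dict.ofList data).keys false

-- ===== PRECONDITION & SPEC =====
def Spec_dict_contains_only_attr (data : List (String × String)) (out : Bool) : Prop := out = dict_contains_only_attr_alt data
instance (data : List (String × String)) (out : Bool) : Decidable (Spec_dict_contains_only_attr data out) := by unfold Spec_dict_contains_only_attr; infer_instance

-- ===== CLAIM (what is proved, stated in full; the proofs are below) =====
def Claim_equal_dict_contains_only_attr : Prop := ∀ (data : List (String × String)), Dom_dict_contains_only_attr data → Spec_dict_contains_only_attr data (dict_contains_only_attr data)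

-- ===== LEMMAS AND PROOFS =====

-- the scan returns (flag-or-nonempty) AND all keys allowed
theorem altScan_eq (l : List String) (b : Bool) :
    altScan l b = ((b || !l.isEmpty) && l.all (fun k => k == "value" || k == "unit")) := by
  induction l generalizing b with
  | nil => simp [altScan]
  | cons k ks ih =>
    simp only [altScan, ih]
    by_cases hv : k = "value" <;> by_cases hu : k = "unit" <;> simp_all

-- erasing "value" then "unit" empties the items list iff every key is "value" or "unit"
theorem erase_both_empty_iff (l : List (String × String)) :
    (((l.filter (fun p => !(p.1 == "value"))).filter (fun p => !(p.1 == "unit"))).length = 0)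
      ↔ (l.all (fun p => p.1 == "value" || p.1 == "unit") = true) := by
  rw [List.length_eq_zero_iff, List.filter_filter, List.filter_eq_nil_iff, List.all_eq_true]
  constructor <;> intro h p hp <;> have hh := h p hp <;> revert hh <;>
    cases hv : p.1 == "value" <;> cases hu : p.1 == "unit" <;> simp_all

-- ===== VERDICT (by name: the statement is the Claim_ definition above) =====
theorem dict_contains_only_attr_spec : Claim_equal_dict_contains_only_attr := by
  intro data _
  unfold Spec_dict_contains_only_attr dict_contains_only_attr dict_contains_only_attr_alt
  rw [altScan_eq]
  set d := PySem.Dict.ofList data with hd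
  by_cases h0 : d.items.length = 0
  · simp [PySem.Dict.size, PySem.Dict.keys, h0, List.isEmpty_iff,
      List.length_eq_zero_iff.mp h0]
  · have hpos : 0 < d.items.length := Nat.pos_of_ne_zero h0
    have hne : d.items ≠ [] := by
      intro h; simp [h] at h0
    rw [if_neg (by simpa [PySem.Dict.size] using h0)]
    have hmap : ((d.items.map (fun x => x.1)).isEmpty) = false := by
      simp [List.isEmpty_iff, hne]
    simp only [PySem.Dict.size, PySem.Dict.erase, PySem.Dict.keys, List.foldl,
      hmap, Bool.not_false, Bool.false_or, Bool.true_and]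
    rw [Bool.eq_iff_iff, beq_iff_eq, List.all_map]
    exact erase_both_empty_iff d.items
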